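-- pv_equiv track=rewrite | github.com/nischala755/nischala_gs_python_oct24 | assignments_week1.py | nth_term_series
-- ===== SOURCE A (Python) =====
-- def nth_term_series(n):
--     series = []
--     a, b = 1, 2
--     for _ in range(n):
--         if len(series) < 2 or series[-1] != b:
--             series.append(b)
--         a, b = b, a + b if len(series) % 2 == 0 else a + 1
--     return series[n - 1]
-- ===== SOURCE B (Python) =====
-- def nth_term_series(n):
--     k = n - 1
--     if k % 2 == 0:
--         m = k // 2
--         return 1 + (m + 1) * (m + 2) // 2
--     return k // 2 + 2
-- ===== Notes on version B (the rewrite author's own statement) =====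
-- stated objective: faster
-- what changed: Replaced the O(n) list-building loop by an O(1) closed form: the series interleaves 1+T(m+1) (triangular numbers) at even 0-based indices with m+2 at odd ones.
import Mathlib
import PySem

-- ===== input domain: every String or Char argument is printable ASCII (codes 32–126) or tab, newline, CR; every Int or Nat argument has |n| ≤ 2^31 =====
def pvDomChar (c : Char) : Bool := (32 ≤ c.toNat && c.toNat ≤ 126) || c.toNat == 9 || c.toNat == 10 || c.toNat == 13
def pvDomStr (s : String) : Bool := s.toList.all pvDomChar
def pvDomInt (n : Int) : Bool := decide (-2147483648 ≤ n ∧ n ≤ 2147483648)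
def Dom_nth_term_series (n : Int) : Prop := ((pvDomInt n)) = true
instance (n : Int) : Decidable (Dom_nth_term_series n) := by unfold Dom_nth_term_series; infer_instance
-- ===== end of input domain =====

-- B replaces A's O(n) list-building loop by an O(1) closed form for the nth term.

-- ===== PORT A =====
-- one iteration of A's loop body on the state (series, a, b); a Python list is an
-- Array here (append = push, series[-1] on a list the condition keeps nonempty = back?)
def pvStepA (st : Array Int × Int × Int) : Array Int × Int × Int :=
  match st with
  | (series, a, b) =>
    let series' := if series.size < 2 ∨ series.back? ≠ some b
                   then series.push b else series
    (series', b, if series'.size % 2 == 0 then a + b else a + 1)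

def nth_term_series (n : Int) : Int :=
  let st := (PySem.List.pyRange 0 n 1).foldl (fun s _ => pvStepA s) ((#[] : Array Int), 1, 2)
  (PySem.List.pyGet? st.1.toList (n - 1)).getD 0   -- series[n-1]; Pre_ excludes the IndexError inputs

-- ===== PORT B =====
def nth_term_series_alt (n : Int) : Int :=
  let k := n - 1
  if PySem.Int.mod k 2 == 0 then
    let m := PySem.Int.floordiv k 2
    1 + PySem.Int.floordiv ((m + 1) * (m + 2)) 2
  else
    PySem.Int.floordiv k 2 + 2

-- ===== PRECONDITION & SPEC =====
-- A raises IndexError (series[n-1] on a too-short list) exactly when n < 1.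
def Pre_nth_term_series (n : Int) : Prop := 1 ≤ n
instance (n : Int) : Decidable (Pre_nth_term_series n) := by unfold Pre_nth_term_series; infer_instance
def pvWitness_nth_term_series : Int := (3)

def Spec_nth_term_series (n : Int) (out : Int) : Prop := out = nth_term_series_alt n
instance (n : Int) (out : Int) : Decidable (Spec_nth_term_series n out) := by unfold Spec_nth_term_series; infer_instance

-- ===== CLAIM (what is proved, stated in full; the proofs are below) =====
def Claim_equal_nth_term_series : Prop := ∀ (n : Int), Dom_nth_term_series n → Pre_nth_term_series n → Spec_nth_term_series n (nth_term_series n)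

-- ===== LEMMAS AND PROOFS =====

-- triangular numbers
def pvTri : Nat → Nat
  | 0 => 0
  | m + 1 => pvTri m + (m + 1)

-- value of series[i] (0-based)
def pvVal (i : Nat) : Int :=
  if i % 2 = 0 then ((1 + pvTri (i / 2 + 1) : Nat) : Int) else ((i / 2 + 2 : Nat) : Int)

theorem pvTri_two (m : Nat) : 2 * pvTri m = m * (m + 1) := by
  induction m with
  | zero => rfl
  | succ m ih =>
    show 2 * (pvTri m + (m + 1)) = _
    rw [Nat.mul_add, ih]
    ring

theorem pvTri_ge (m : Nat) : m ≤ pvTri m := by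
  induction m with
  | zero => simp
  | succ m ih =>
    show m + 1 ≤ pvTri m + (m + 1)
    omega

theorem pvVal_even (m : Nat) : pvVal (2 * m) = ((1 + pvTri (m + 1) : Nat) : Int) := by
  unfold pvVal
  rw [if_pos (by omega : (2 * m) % 2 = 0), (by omega : (2 * m) / 2 = m)]

theorem pvVal_odd (m : Nat) : pvVal (2 * m + 1) = ((m + 2 : Nat) : Int) := by
  unfold pvVal
  rw [if_neg (by omega : ¬ (2 * m + 1) % 2 = 0), (by omega : (2 * m + 1) / 2 = m)]

-- adjacent series values are distinct once the list has length ≥ 2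
theorem pvVal_ne (j : Nat) (hj : 2 ≤ j) : pvVal (j - 1) ≠ pvVal j := by
  have hstep : ∀ m : Nat, pvTri (m + 1) = pvTri m + (m + 1) := fun _ => rfl
  rcases Nat.even_or_odd j with ⟨m, hm⟩ | ⟨m, hm⟩
  · have hm1 : 1 ≤ m := by omega
    rw [(by omega : j - 1 = 2 * (m - 1) + 1), (by omega : j = 2 * m), pvVal_odd, pvVal_even]
    intro h
    have h' : (m - 1) + 2 = 1 + pvTri (m + 1) := by exact_mod_cast h
    have := pvTri_ge m
    have := hstep m
    omega
  · have hm1 : 1 ≤ m := by omega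
    rw [(by omega : j - 1 = 2 * m), hm, pvVal_even, pvVal_odd]
    intro h
    have h' : 1 + pvTri (m + 1) = m + 2 := by exact_mod_cast h
    have := pvTri_ge m
    have := hstep m
    omega

theorem pvFoldl_const (l : List Int) (st : Array Int × Int × Int) :
    l.foldl (fun s _ => pvStepA s) st = pvStepA^[l.length] st := by
  induction l generalizing st with
  | nil => rfl
  | cons x xs ih => simp [List.foldl_cons, ih, Function.iterate_succ_apply]

-- the loop invariant: after j ≥ 1 iterations the state is (map pvVal (range j), pvVal (j-1), pvVal j)
theorem pvIter (j : Nat) (hj : 1 ≤ j) :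
    pvStepA^[j] ((#[] : Array Int), 1, 2) = (((List.range j).map pvVal).toArray, pvVal (j - 1), pvVal j) := by
  induction j with
  | zero => omega
  | succ j ih =>
    rcases Nat.eq_or_lt_of_le hj with h1 | h1
    · have : j = 0 := by omega
      subst this
      decide
    · have hj1 : 1 ≤ j := by omega
      rw [Function.iterate_succ_apply', ih hj1]
      simp only [pvStepA]
      have hlen : ((List.range j).map pvVal).toArray.size = j := by simp
      have hcond : ((List.range j).map pvVal).toArray.size < 2 ∨
          ((List.range j).map pvVal).toArray.back? ≠ some (pvVal j) := by
        by_cases h2 : j < 2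
        · left; omega
        · right
          rw [List.back?_toArray, List.getLast?_eq_getElem?]
          have hjj : j - 1 < j := by omega
          simp only [List.length_map, List.length_range, List.getElem?_map,
            List.getElem?_range hjj, Option.map_some]
          intro h
          exact pvVal_ne j (by omega) (by simpa using h)
      rw [if_pos hcond]
      have hser : ((List.range j).map pvVal).toArray.push (pvVal j)
          = ((List.range (j + 1)).map pvVal).toArray := by
        rw [List.push_toArray, List.range_succ, List.map_append]; rfl
      rw [hser]
      have hlen' : ((List.range (j + 1)).map pvVal).toArray.size = j + 1 := by simp
      rw [hlen']
      have hb : (if ((j + 1) % 2 == 0) = true then pvVal (j - 1) + pvVal j else pvVal (j - 1) + 1)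
          = pvVal (j + 1) := by
        rcases Nat.even_or_odd j with ⟨m, hm⟩ | ⟨m, hm⟩
        · have hm1 : 1 ≤ m := by omega
          rw [if_neg (by simp; omega)]
          rw [(by omega : j - 1 = 2 * (m - 1) + 1), (by omega : j + 1 = 2 * (m - 1) + 1 + 1 + 1)]
          rw [(by omega : 2 * (m - 1) + 1 + 1 + 1 = 2 * m + 1), pvVal_odd, pvVal_odd]
          push_cast
          omega
        · rw [if_pos (by simp; omega)]
          rw [(by omega : j - 1 = 2 * m), hm, (by omega : 2 * m + 1 + 1 = 2 * (m + 1)),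
            pvVal_even, pvVal_odd, pvVal_even]
          have hstep : pvTri (m + 1 + 1) = pvTri (m + 1) + (m + 1 + 1) := rfl
          push_cast [hstep]
          ring
      rw [hb, (by omega : j + 1 - 1 = j)]

-- B's closed form equals pvVal
theorem pvAlt_eq (i : Nat) : nth_term_series_alt ((i : Int) + 1) = pvVal i := by
  simp only [nth_term_series_alt]
  rw [show ((i : Int) + 1 - 1) = (i : Int) from by ring]
  have hmod : PySem.Int.mod ((i : Nat) : Int) 2 = ((i % 2 : Nat) : Int) := by
    exact_mod_cast PySem.Int.mod_natCast i 2
  have hdiv : PySem.Int.floordiv ((i : Nat) : Int) 2 = ((i / 2 : Nat) : Int) := by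
    exact_mod_cast PySem.Int.floordiv_natCast i 2
  rw [hmod, hdiv]
  rcases Nat.even_or_odd i with ⟨m, hm⟩ | ⟨m, hm⟩
  · rw [(by omega : i % 2 = 0), (by omega : i / 2 = m), if_pos (by norm_num)]
    rw [show ((m : Int) + 1) * ((m : Int) + 2) = (((m + 1) * (m + 2) : Nat) : Int) from by push_cast; ring]
    rw [show PySem.Int.floordiv ((((m + 1) * (m + 2) : Nat)) : Int) 2 = ((((m + 1) * (m + 2)) / 2 : Nat) : Int) from by
      exact_mod_cast PySem.Int.floordiv_natCast ((m + 1) * (m + 2)) 2]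
    rw [hm, (by omega : m + m = 2 * m), pvVal_even]
    have h2t : 2 * pvTri (m + 1) = (m + 1) * (m + 2) := by rw [pvTri_two]
    omega
  · rw [(by omega : i % 2 = 1), (by omega : i / 2 = m), if_neg (by norm_num), hm, pvVal_odd]
    push_cast
    ring

-- ===== VERDICT (by name: the statement is the Claim_ definition above) =====
theorem nth_term_series_spec : Claim_equal_nth_term_series := by
  intro n _ hpre
  unfold Spec_nth_term_series nth_term_series
  have hpre' : (1 : Int) ≤ n := hpre
  set j : Nat := (n - 1).toNat with hjdef
  have hn : n = (j : Int) + 1 := by omega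
  have hlen : (PySem.List.pyRange 0 n 1).length = j + 1 := by
    rw [PySem.List.length_pyRange_one]; omega
  rw [pvFoldl_const, hlen, pvIter (j + 1) (by omega)]
  simp only [List.toList_toArray]
  have hidx : n - 1 = ((j : Nat) : Int) := by omega
  rw [hidx, PySem.List.pyGet?_natCast]
  have hj : j < j + 1 := by omega
  simp only [List.getElem?_map, List.getElem?_range hj, Option.map_some, Option.getD_some]
  rw [hn, pvAlt_eq]
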